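-- pv_equiv track=rewrite | github.com/Runarok/GeeksForGeeks-solutions | Difficulty: Easy/Meta Strings/meta-strings.py | metaStrings
-- ===== SOURCE A (Python) =====
-- def metaStrings(S1, S2):
--     # Check if lengths are the same, otherwise they can't be meta strings
--     if len(S1) != len(S2):
--         return 0
--
--     # If both strings are already equal, they are not meta strings
--     if S1 == S2:
--         return 0
--
--     # Find the positions where characters differ
--     diff = []
--     for i in range(len(S1)):
--         if S1[i] != S2[i]:
--             diff.append(i)
--
--     # If there are exactly two positions where the strings differ
--     # and swapping them makes the strings equal
--     if len(diff) == 2: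
--         i, j = diff
--         if S1[i] == S2[j] and S1[j] == S2[i]:
--             return 1
--
--     return 0
-- ===== SOURCE B (Python) =====
-- def metaStrings(S1, S2):
--     # Length guard; then: exactly two mismatching positions and equal
--     # character multisets <=> one swap turns S1 into S2.
--     if len(S1) != len(S2):
--         return 0
--     d = sum(1 for a, b in zip(S1, S2) if a != b)
--     if d == 2 and sorted(S1) == sorted(S2):
--         return 1
--     return 0
-- ===== Notes on version B (the rewrite author's own statement) =====
-- stated objective: idiomatic
-- what changed: Replaces the explicit diff-position list and index-pair swap check with a one-pass mismatch count plus a sorted-multiset comparison (1 iff exactly 2 mismatches and sorted(S1)==sorted(S2)).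
import Mathlib
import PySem

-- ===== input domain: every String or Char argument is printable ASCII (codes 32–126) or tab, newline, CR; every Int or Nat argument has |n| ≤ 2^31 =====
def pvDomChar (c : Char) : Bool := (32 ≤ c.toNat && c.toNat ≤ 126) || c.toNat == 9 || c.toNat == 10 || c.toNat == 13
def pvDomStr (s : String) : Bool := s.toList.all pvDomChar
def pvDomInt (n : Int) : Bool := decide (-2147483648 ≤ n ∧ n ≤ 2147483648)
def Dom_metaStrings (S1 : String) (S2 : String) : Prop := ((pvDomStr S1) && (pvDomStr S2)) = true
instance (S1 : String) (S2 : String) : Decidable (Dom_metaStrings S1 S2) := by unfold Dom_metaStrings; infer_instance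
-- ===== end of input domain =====

-- B replaces A's diff-position list and explicit index-pair swap check by a one-pass
-- mismatch count plus a sorted-multiset comparison (idiomatic; not faster).

-- ===== PORT A =====
-- Python string equality/indexing ported on .toList (exact: Python str equality is
-- character-sequence equality; S1[i]/S2[i] via PySem.List.pyGet?, indices from range are in range).
def metaStrings (S1 : String) (S2 : String) : Int :=
  if S1.toList.length ≠ S2.toList.length then 0
  else if S1.toList = S2.toList then 0
  else
    let diff := (PySem.List.pyRange 0 (S1.toList.length : Int) 1).foldl
      (fun acc i => if PySem.List.pyGet? S1.toList i ≠ PySem.List.pyGet? S2.toList i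
                    then acc ++ [i] else acc) []
    match diff with
    | [i, j] =>
        if PySem.List.pyGet? S1.toList i = PySem.List.pyGet? S2.toList j ∧
           PySem.List.pyGet? S1.toList j = PySem.List.pyGet? S2.toList i
        then 1 else 0
    | _ => 0

-- ===== PORT B =====
def metaStrings_alt (S1 : String) (S2 : String) : Int :=
  if S1.toList.length ≠ S2.toList.length then 0
  else
    let d : Int := (S1.toList.zip S2.toList).foldl
      (fun acc p => if p.1 ≠ p.2 then acc + 1 else acc) 0
    if d = 2 ∧ PySem.List.sorted S1.toList (fun x => x) false
                 = PySem.List.sorted S2.toList (fun x => x) false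
    then 1 else 0

-- ===== PRECONDITION & SPEC =====
def Spec_metaStrings (S1 : String) (S2 : String) (out : Int) : Prop := out = metaStrings_alt S1 S2
instance (S1 : String) (S2 : String) (out : Int) : Decidable (Spec_metaStrings S1 S2 out) := by unfold Spec_metaStrings; infer_instance

-- ===== CLAIM (what is proved, stated in full; the proofs are below) =====
def Claim_equal_metaStrings : Prop := ∀ (S1 : String) (S2 : String), Dom_metaStrings S1 S2 → Spec_metaStrings S1 S2 (metaStrings S1 S2)

-- ===== LEMMAS AND PROOFS =====

-- B's counting fold is the length of the mismatch sublist of the zip.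
theorem pvFoldlCount (l : List (Char × Char)) (acc : Int) :
    l.foldl (fun acc p => if p.1 ≠ p.2 then acc + 1 else acc) acc
      = acc + ((l.filter (fun p => !decide (p.1 = p.2))).length : Int) := by
  induction l generalizing acc with
  | nil => simp
  | cons x t ih =>
      simp only [List.foldl_cons, List.filter_cons]
      by_cases hx : x.1 = x.2
      · rw [if_neg (fun hc => hc hx), if_neg (by simp [hx])]
        exact ih acc
      · rw [if_pos hx, if_pos (by simp [hx]), ih (acc + 1)]
        simp only [List.length_cons]
        push_cast
        ring

-- The pairs that A reads at its diff positions are exactly the mismatching pairs of the zip.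
theorem pvBridge : ∀ (l1 l2 : List Char), l1.length = l2.length →
    ((List.range l1.length).filter (fun k => !decide (l1[k]? = l2[k]?))).map
        (fun k => (l1[k]?, l2[k]?))
      = ((l1.zip l2).filter (fun p => !decide (p.1 = p.2))).map (fun p => (some p.1, some p.2)) := by
  intro l1
  induction l1 with
  | nil => intro l2 h; cases l2 <;> simp at h ⊢
  | cons a t1 ih =>
      intro l2 h
      cases l2 with
      | nil => simp at h
      | cons c t2 =>
          simp only [List.length_cons, Nat.add_right_cancel_iff] at h
          have hrec := ih t2 h
          by_cases hac : a = c <;>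
            [skip; skip] <;>
            (simp [List.range_succ_eq_map, hac, List.filter_map, List.map_map,
                   Function.comp_def]
             exact hrec)

-- every pair of zip l l has equal components
theorem pvZipSelfMem (l : List Char) : ∀ p : Char × Char, p ∈ l.zip l → p.1 = p.2 := by
  induction l with
  | nil => intro p hp; simp at hp
  | cons a t ih =>
      intro p hp
      rcases (by simpa using hp : p = (a, a) ∨ p ∈ t.zip t) with h | h
      · subst h; rfl
      · exact ih p h

-- mismatches of zip l l is empty
theorem pvZipSelf (l : List Char) :
    ((l.zip l).filter (fun p => !decide (p.1 = p.2))) = [] := by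
  rw [List.filter_eq_nil_iff]
  intro p hp
  simp only [Bool.not_eq_eq_eq_not, Bool.not_true, decide_eq_false_iff_not, Decidable.not_not]
  exact pvZipSelfMem l p hp

-- l1 ~ l2 iff the firsts of the mismatching pairs are a permutation of the seconds.
theorem pvPermIff (l1 l2 : List Char) (h : l1.length = l2.length) :
    l1.Perm l2 ↔
      (((l1.zip l2).filter (fun p => !decide (p.1 = p.2))).map Prod.fst).Perm
        (((l1.zip l2).filter (fun p => !decide (p.1 = p.2))).map Prod.snd) := by
  have h1 : (l1.zip l2).map Prod.fst = l1 := List.map_fst_zip h.le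
  have h2 : (l1.zip l2).map Prod.snd = l2 := List.map_snd_zip h.ge
  have hsplit : ((l1.zip l2).filter (fun p => decide (p.1 = p.2)) ++
      (l1.zip l2).filter (fun p => !decide (p.1 = p.2))).Perm (l1.zip l2) := by
    have := List.filter_append_perm (fun p : Char × Char => decide (p.1 = p.2)) (l1.zip l2)
    simpa using this
  have hE : ((l1.zip l2).filter (fun p => decide (p.1 = p.2))).map Prod.fst
      = ((l1.zip l2).filter (fun p => decide (p.1 = p.2))).map Prod.snd := by
    apply List.map_congr_left
    intro p hp
    have := List.of_mem_filter hp
    simpa using of_decide_eq_true this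
  have hl1 : l1.Perm (((l1.zip l2).filter (fun p => decide (p.1 = p.2))).map Prod.fst ++
      ((l1.zip l2).filter (fun p => !decide (p.1 = p.2))).map Prod.fst) := by
    have h' := (hsplit.map Prod.fst).symm
    rw [List.map_append] at h'
    rw [h1] at h'
    exact h'
  have hl2 : l2.Perm (((l1.zip l2).filter (fun p => decide (p.1 = p.2))).map Prod.fst ++
      ((l1.zip l2).filter (fun p => !decide (p.1 = p.2))).map Prod.snd) := by
    have h' := (hsplit.map Prod.snd).symm
    rw [List.map_append] at h'
    rw [h2, ← hE] at h'
    exact h'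
  constructor
  · intro hp
    exact (List.perm_append_left_iff _).mp (hl1.symm.trans (hp.trans hl2))
  · intro hp
    exact hl1.trans (((List.perm_append_left_iff _).mpr hp).trans hl2.symm)

-- two mismatching pairs: permutation means exactly the swap
theorem pvPairPerm {a b c d : Char} (hac : a ≠ c) (hbd : b ≠ d) :
    ([a, b].Perm [c, d]) ↔ (a = d ∧ b = c) := by
  constructor
  · intro h
    have ha : a ∈ [c, d] := h.mem_iff.mp (by simp)
    have had : a = d := by
      rcases (by simpa using ha : a = c ∨ a = d) with h' | h'
      · exact absurd h' hac
      · exact h'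
    subst had
    have h' : ([a, b].Perm [a, c]) := h.trans (List.Perm.swap a c [])
    have hb : b = c := by
      have := (List.perm_cons a).mp h'
      simpa using this
    exact ⟨rfl, hb⟩
  · rintro ⟨rfl, rfl⟩
    exact List.Perm.swap b a []

theorem pvMain (S1 S2 : String) : metaStrings S1 S2 = metaStrings_alt S1 S2 := by
  unfold metaStrings metaStrings_alt
  by_cases hl : S1.toList.length = S2.toList.length
  · have hne : ¬ (S1.toList.length ≠ S2.toList.length) := fun hc => hc hl
    rw [if_neg hne]; rw [if_neg hne]
    rw [pvFoldlCount (S1.toList.zip S2.toList) 0]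
    rw [PySem.List.foldl_append_ite_eq_filter
        (fun i => PySem.List.pyGet? S1.toList i ≠ PySem.List.pyGet? S2.toList i)]
    rw [PySem.List.pyRange_zero_nat, List.filter_map]
    simp only [Function.comp_def, PySem.List.pyGet?_natCast, List.nil_append, ne_eq, decide_not]
    have hbr := pvBridge S1.toList S2.toList hl
    have hlen : ((List.range S1.toList.length).filter
          (fun k => !decide (S1.toList[k]? = S2.toList[k]?))).length
        = ((S1.toList.zip S2.toList).filter (fun p => !decide (p.1 = p.2))).length := by
      have := congrArg List.length hbr
      simpa using this
    by_cases heq : S1.toList = S2.toList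
    · rw [if_pos heq]
      rw [show S2.toList = S1.toList from heq.symm, pvZipSelf]
      simp
    · rw [if_neg heq]
      by_cases hz : ((S1.toList.zip S2.toList).filter (fun p => !decide (p.1 = p.2))).length = 2
      · -- exactly two mismatching pairs
        obtain ⟨p1, p2, hz2⟩ := List.length_eq_two.mp hz
        obtain ⟨a, c⟩ := p1
        obtain ⟨b, d⟩ := p2
        have hF2 : ((List.range S1.toList.length).filter
            (fun k => !decide (S1.toList[k]? = S2.toList[k]?))).length = 2 := by
          rw [hlen]; exact hz
        obtain ⟨i, j, hFn⟩ := List.length_eq_two.mp hF2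
        have hac : a ≠ c := by
          have hm : (a, c) ∈ (S1.toList.zip S2.toList).filter (fun p => !decide (p.1 = p.2)) := by
            rw [hz2]; simp
          have := List.of_mem_filter hm
          simpa using this
        have hbd : b ≠ d := by
          have hm : (b, d) ∈ (S1.toList.zip S2.toList).filter (fun p => !decide (p.1 = p.2)) := by
            rw [hz2]; simp
          have := List.of_mem_filter hm
          simpa using this
        rw [hFn, hz2] at hbr
        simp only [List.map_cons, List.map_nil, List.cons.injEq, Prod.mk.injEq,
          and_true] at hbr
        obtain ⟨⟨hi1, hi2⟩, hj1, hj2⟩ := hbr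
        rw [hFn, hz2]
        simp only [List.map_cons, List.map_nil]
        have hiff : (PySem.List.pyGet? S1.toList ↑i = PySem.List.pyGet? S2.toList ↑j ∧
              PySem.List.pyGet? S1.toList ↑j = PySem.List.pyGet? S2.toList ↑i)
            ↔ ((0 : Int) + ↑([((a : Char), (c : Char)), (b, d)].length) = 2 ∧
              PySem.List.sorted S1.toList (fun x => x) false
                = PySem.List.sorted S2.toList (fun x => x) false) := by
          rw [PySem.List.pyGet?_natCast, PySem.List.pyGet?_natCast,
              PySem.List.pyGet?_natCast, PySem.List.pyGet?_natCast,
              hi1, hi2, hj1, hj2]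
          rw [PySem.List.sorted_id_eq_sorted_id_iff_perm, pvPermIff S1.toList S2.toList hl, hz2]
          simp only [List.map_cons, List.map_nil, List.length_cons, List.length_nil]
          rw [pvPairPerm hac hbd]
          simp
        exact if_congr hiff rfl rfl
      · -- mismatch count is not two: both sides give 0
        have hB : ¬ ((0 : Int) + ↑(((S1.toList.zip S2.toList).filter
              (fun p => !decide (p.1 = p.2))).length) = 2 ∧
            PySem.List.sorted S1.toList (fun x => x) false
              = PySem.List.sorted S2.toList (fun x => x) false) := by
          rintro ⟨h1, -⟩
          omega
        rw [if_neg hB]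
        have hF2 : ((List.range S1.toList.length).filter
            (fun k => !decide (S1.toList[k]? = S2.toList[k]?))).length ≠ 2 := by
          rw [hlen]; exact hz
        generalize hG : (List.range S1.toList.length).filter
            (fun k => !decide (S1.toList[k]? = S2.toList[k]?)) = F at hF2
        rcases F with _ | ⟨x, _ | ⟨y, _ | ⟨w, t⟩⟩⟩
        · rfl
        · rfl
        · simp at hF2
        · rfl
  · rw [if_pos hl]; rw [if_pos hl]

-- ===== VERDICT (by name: the statement is the Claim_ definition above) =====
theorem metaStrings_spec : Claim_equal_metaStrings := by
  intro S1 S2 _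
  unfold Spec_metaStrings
  exact pvMain S1 S2
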